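-- pv_equiv track=rewrite | github.com/hnrm110901-cell/tunxiang-os | shared/knowledge_store/tests/test_chunker.py | _make_long_text
-- ===== SOURCE A (Python) =====
-- def _make_long_text(sentences: int = 50) -> str:
--     """生成多句中文文本"""
--     base_sentences = [
--         "红烧肉是中华传统名菜。",
--         "选用上等五花肉切块。",
--         "先焯水去腥再炒糖色。",
--         "加入料酒酱油慢炖两小时。",
--         "成品色泽红亮入口即化。",
--     ]
--     return "".join(base_sentences[i % len(base_sentences)] for i in range(sentences))
-- ===== SOURCE B (Python) =====
-- def _make_long_text(sentences: int = 50) -> str: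
--     """生成多句中文文本"""
--     base_sentences = [
--         "红烧肉是中华传统名菜。",
--         "选用上等五花肉切块。",
--         "先焯水去腥再炒糖色。",
--         "加入料酒酱油慢炖两小时。",
--         "成品色泽红亮入口即化。",
--     ]
--     q, r = divmod(max(sentences, 0), len(base_sentences))
--     cycle = "".join(base_sentences)
--     return cycle * q + "".join(base_sentences[:r])
-- ===== Notes on version B (the rewrite author's own statement) =====
-- stated objective: faster
-- what changed: Replaces the per-index modulo generator loop with one divmod: the whole-cycle string is built once and repeated q times, plus a joined partial tail of r sentences (negatives clamped to 0).
import Mathlib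
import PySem

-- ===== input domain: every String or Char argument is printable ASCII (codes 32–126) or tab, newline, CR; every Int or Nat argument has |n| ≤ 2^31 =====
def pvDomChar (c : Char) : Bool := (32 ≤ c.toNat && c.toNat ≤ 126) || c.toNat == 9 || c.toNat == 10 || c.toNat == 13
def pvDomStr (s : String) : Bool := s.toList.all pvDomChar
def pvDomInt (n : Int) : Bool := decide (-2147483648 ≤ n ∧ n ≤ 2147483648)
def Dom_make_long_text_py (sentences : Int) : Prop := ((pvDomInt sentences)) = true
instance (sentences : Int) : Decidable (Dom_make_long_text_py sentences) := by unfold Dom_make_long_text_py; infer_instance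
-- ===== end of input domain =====

-- B builds the text by block repetition (divmod, whole cycle repeated q times, partial tail)
-- instead of A's per-index modulo loop; equivalence proved for all Int inputs (negatives give "").

-- the module-level constant list both Pythons carry verbatim
def pyBaseSentences : List String :=
  ["红烧肉是中华传统名菜。",
   "选用上等五花肉切块。",
   "先焯水去腥再炒糖色。",
   "加入料酒酱油慢炖两小时。",
   "成品色泽红亮入口即化。"]

-- ===== PORT A =====
-- "".join(base[i % len(base)] for i in range(sentences)); len(base) = 5; index always in range
def make_long_text_py (sentences : Int) : String :=
  PySem.Str.join "" ((PySem.List.pyRange 0 sentences 1).map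
    (fun i => PySem.List.pyGetD pyBaseSentences (PySem.Int.mod i 5) ""))

-- ===== PORT B =====
-- Python's s * q is ported by hand as "".join of q copies (exact: q ≤ 0 gives "")
def make_long_text_py_alt (sentences : Int) : String :=
  let count : Int := max sentences 0
  let qr : Int × Int := (PySem.Int.divmod? count 5).getD (0, 0)  -- divisor 5 ≠ 0, never none
  let cycle : String := PySem.Str.join "" pyBaseSentences
  PySem.Str.join "" (List.replicate qr.1.toNat cycle)
    ++ PySem.Str.join "" (PySem.List.slice pyBaseSentences none (some qr.2))

-- ===== PRECONDITION & SPEC =====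
def Spec_make_long_text_py (sentences : Int) (out : String) : Prop := out = make_long_text_py_alt sentences
instance (sentences : Int) (out : String) : Decidable (Spec_make_long_text_py sentences out) := by unfold Spec_make_long_text_py; infer_instance

-- ===== CLAIM (what is proved, stated in full; the proofs are below) =====
def Claim_equal_make_long_text_py : Prop := ∀ (sentences : Int), Dom_make_long_text_py sentences → Spec_make_long_text_py sentences (make_long_text_py sentences)

-- ===== LEMMAS AND PROOFS =====

-- "".join is List.flatten on the char-list side
lemma chars_join_nil_eq_flatten (l : List (List Char)) :
    PySem.Chars.join [] l = l.flatten := by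
  induction l with
  | nil => rfl
  | cons x l ih =>
    cases l with
    | nil => simp [PySem.Chars.join, List.intercalate]
    | cons y l =>
      simp only [PySem.Chars.join, List.intercalate] at *
      simp [List.intersperse] at *
      simpa using ih

-- the heart: indexing range n through k % m is q whole copies of the list plus a take of the remainder
lemma range_mod_getD {α : Type} (base : List α) (d : α) (hm : base.length = 5) (n : Nat) :
    (List.range n).map (fun k => base.getD (k % 5) d)
      = (List.replicate (n / 5) base).flatten ++ base.take (n % 5) := by
  induction n with
  | zero => simp
  | succ n ih =>
    rw [List.range_succ, List.map_append, ih, List.map_singleton]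
    by_cases h4 : n % 5 = 4
    · have hq : (n + 1) / 5 = n / 5 + 1 := by omega
      have hr : (n + 1) % 5 = 0 := by omega
      rw [hq, hr, List.replicate_succ', List.flatten_append, h4]
      have h5 : base[4]? = some base[4] := List.getElem?_eq_getElem (by omega)
      have hstep : base.take (4+1) = base.take 4 ++ [base[4]] := by
        rw [List.take_add_one, h5]; rfl
      have htake : base.take 5 = base := List.take_of_length_le (by omega)
      rw [List.take_zero, List.append_nil, List.flatten_cons, List.flatten_nil,
        List.append_nil, List.append_assoc]
      congr 1
      rw [List.getD_eq_getElem?_getD, h5, Option.getD_some, ← hstep]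
      exact htake
    · have hq : (n + 1) / 5 = n / 5 := by omega
      have hr : (n + 1) % 5 = n % 5 + 1 := by omega
      have hlt : n % 5 < base.length := by omega
      rw [hq, hr, List.take_add_one, List.append_assoc]
      have : base[n % 5]? = some base[n % 5] := List.getElem?_eq_getElem hlt
      rw [this, List.getD_eq_getElem base d hlt]
      rfl

lemma flatten_flatten_replicate {α : Type} (q : Nat) (xs : List (List α)) :
    ((List.replicate q xs).flatten).flatten = (List.replicate q xs.flatten).flatten := by
  induction q with
  | zero => rfl
  | succ q ih => simp only [List.replicate_succ, List.flatten_cons, List.flatten_append, ih]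

-- ===== VERDICT (by name: the statement is the Claim_ definition above) =====
theorem make_long_text_py_spec : Claim_equal_make_long_text_py := by
  intro s _
  unfold Spec_make_long_text_py make_long_text_py make_long_text_py_alt
  have hmax : max s 0 = (s.toNat : Int) := by omega
  have hdm : PySem.Int.divmod? (s.toNat : Int) 5
      = some (((s.toNat / 5 : Nat) : Int), ((s.toNat % 5 : Nat) : Int)) := by
    simp only [PySem.Int.divmod?, if_neg (by norm_num : (5:Int) ≠ 0), Option.some.injEq,
      Prod.mk.injEq]
    constructor
    · rw [Int.fdiv_eq_ediv]; push_cast; rfl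
    · rw [Int.fmod_eq_emod]; push_cast; rfl
  dsimp only
  rw [hmax, hdm]
  dsimp only [Option.getD_some]
  apply String.toList_inj.mp
  -- A side: range through modulo indexing
  have hA : (PySem.List.pyRange 0 s 1).map
      (fun i => PySem.List.pyGetD pyBaseSentences (PySem.Int.mod i 5) "")
      = (List.replicate (s.toNat / 5) pyBaseSentences).flatten
        ++ pyBaseSentences.take (s.toNat % 5) := by
    rw [PySem.List.pyRange_one, List.map_map]
    have hfun : ∀ k : Nat,
        PySem.List.pyGetD pyBaseSentences (PySem.Int.mod (0 + (k:Int)) 5) ""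
          = pyBaseSentences.getD (k % 5) "" := by
      intro k
      rw [zero_add, PySem.Int.mod_eq_emod_of_pos (by norm_num)]
      have : (k:Int) % 5 = ((k % 5 : Nat) : Int) := by push_cast; rfl
      rw [this, PySem.List.pyGetD_natCast]
    have h0 : (s - 0).toNat = s.toNat := by omega
    rw [h0]
    calc (List.range s.toNat).map
          ((fun i => PySem.List.pyGetD pyBaseSentences (PySem.Int.mod i 5) "") ∘ (fun k : Nat => 0 + (k:Int)))
        = (List.range s.toNat).map (fun k => pyBaseSentences.getD (k % 5) "") :=
          List.map_congr_left (fun k _ => hfun k)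
      _ = _ := range_mod_getD pyBaseSentences "" rfl s.toNat
  rw [hA]
  rw [String.toList_append, PySem.Str.toList_join, PySem.Str.toList_join, PySem.Str.toList_join]
  have hsep : ("" : String).toList = [] := rfl
  rw [hsep, chars_join_nil_eq_flatten, chars_join_nil_eq_flatten, chars_join_nil_eq_flatten]
  rw [PySem.List.slice_to pyBaseSentences (by positivity)]
  have hr : ((s.toNat % 5 : Nat) : Int).toNat = s.toNat % 5 := Int.toNat_natCast _
  have hq : ((s.toNat / 5 : Nat) : Int).toNat = s.toNat / 5 := Int.toNat_natCast _
  rw [hr, hq]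
  rw [List.map_append, List.flatten_append]
  congr 1
  -- remaining: whole-cycle blocks agree
  have hcyc : (PySem.Str.join "" pyBaseSentences).toList
      = (pyBaseSentences.map String.toList).flatten := by
    rw [PySem.Str.toList_join, hsep, chars_join_nil_eq_flatten]
  rw [List.map_replicate, hcyc, List.map_flatten, List.map_replicate]
  exact flatten_flatten_replicate _ _
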